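-- pv_equiv track=rewrite | github.com/hellokelson/eks-upgrade-assessment | src/addon_iam_analyzer.py | _generate_cluster_recommendations
-- ===== SOURCE A (Python) =====
-- from typing import Dict, List, Any, Optional
--
-- def _generate_cluster_recommendations(addon_analyses: List[Dict[str, Any]]) -> List[str]:
--     """Generate cluster-level IAM recommendations."""
--     recommendations = []
--
--     error_addons = [a for a in addon_analyses if a.get('validation_status') == 'error']
--     warning_addons = [a for a in addon_analyses if a.get('validation_status') == 'warning']
--
--     if error_addons:
--         recommendations.append(
--             f'Critical: {len(error_addons)} addon(s) have IAM configuration errors that must be fixed before upgrade'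
--         )
--
--     if warning_addons:
--         recommendations.append(
--             f'Review: {len(warning_addons)} addon(s) use custom IAM policies that should be verified for compatibility'
--         )
--
--     if not error_addons and not warning_addons:
--         recommendations.append('All addon IAM configurations are using AWS managed policies as recommended')
--
--     return recommendations
-- ===== SOURCE B (Python) =====
-- # Table-driven rewrite: one frequency table of statuses, then a data-driven
-- # rule table generates the messages; the "all good" line is the `or` fallback.
--
-- _RULES = [
--     ('error',
--      'Critical: ',
--      ' addon(s) have IAM configuration errors that must be fixed before upgrade'),
--     ('warning',
--      'Review: ',
--      ' addon(s) use custom IAM policies that should be verified for compatibility'),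
-- ]
--
-- _ALL_OK = 'All addon IAM configurations are using AWS managed policies as recommended'
--
--
-- def _generate_cluster_recommendations(addon_analyses):
--     """Generate cluster-level IAM recommendations (frequency table + rule table)."""
--     counts = {}
--     for a in addon_analyses:
--         s = a.get('validation_status')
--         counts[s] = counts.get(s, 0) + 1
--
--     recs = []
--     for status, prefix, suffix in _RULES:
--         c = counts.get(status, 0)
--         if c:
--             recs.append(prefix + str(c) + suffix)
--     return recs or [_ALL_OK]
-- ===== Notes on version B (the rewrite author's own statement) =====
-- stated objective: simpler
-- what changed: Replaces the two list-comprehension filtering scans and the explicit three-branch if-chain with one pass building a frequency table of statuses, then a data-driven rule table (status, message parts) emits the messages, with the all-OK line as an `or` fallback.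
import Mathlib
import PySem

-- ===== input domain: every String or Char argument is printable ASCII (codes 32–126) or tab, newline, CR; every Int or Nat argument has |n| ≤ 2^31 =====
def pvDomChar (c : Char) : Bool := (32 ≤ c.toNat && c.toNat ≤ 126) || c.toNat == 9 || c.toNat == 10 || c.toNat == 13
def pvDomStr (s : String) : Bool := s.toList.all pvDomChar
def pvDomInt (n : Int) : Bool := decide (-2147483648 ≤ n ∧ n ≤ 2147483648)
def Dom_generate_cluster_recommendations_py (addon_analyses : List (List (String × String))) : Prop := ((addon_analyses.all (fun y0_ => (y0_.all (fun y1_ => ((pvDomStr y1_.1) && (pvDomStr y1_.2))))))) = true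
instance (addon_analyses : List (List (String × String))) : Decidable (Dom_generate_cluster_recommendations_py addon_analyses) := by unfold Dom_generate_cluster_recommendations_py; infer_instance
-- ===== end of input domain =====

-- B replaces A's two filtering scans and if-chain with one frequency table of statuses
-- plus a data-driven rule table (simpler, table-driven decomposition).

-- ===== PORT A =====
-- dict.get('validation_status') on the association list: first match (Lean's List.lookup)
def generate_cluster_recommendations_py (addon_analyses : List (List (String × String))) : List String :=
  let error_addons := addon_analyses.filter
    (fun a => List.lookup "validation_status" a == some "error")
  let warning_addons := addon_analyses.filter
    (fun a => List.lookup "validation_status" a == some "warning")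
  (if !error_addons.isEmpty then
      ["Critical: " ++ PySem.Int.toStr (error_addons.length : Int) ++
        " addon(s) have IAM configuration errors that must be fixed before upgrade"]
    else []) ++
  (if !warning_addons.isEmpty then
      ["Review: " ++ PySem.Int.toStr (warning_addons.length : Int) ++
        " addon(s) use custom IAM policies that should be verified for compatibility"]
    else []) ++
  (if error_addons.isEmpty && warning_addons.isEmpty then
      ["All addon IAM configurations are using AWS managed policies as recommended"]
    else [])

-- ===== PORT B =====
-- the module-level rule table: (status, message prefix, message suffix)
def pvRules : List (String × String × String) :=
  [("error", "Critical: ",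
      " addon(s) have IAM configuration errors that must be fixed before upgrade"),
   ("warning", "Review: ",
      " addon(s) use custom IAM policies that should be verified for compatibility")]

def pvAllOk : String :=
  "All addon IAM configurations are using AWS managed policies as recommended"

def generate_cluster_recommendations_py_alt (addon_analyses : List (List (String × String))) : List String :=
  -- counts[s] = counts.get(s, 0) + 1 over the statuses (keys may be None → Option String)
  let counts : PySem.Dict (Option String) Int :=
    addon_analyses.foldl
      (fun d a =>
        let s := List.lookup "validation_status" a
        d.insert s (d.getD s 0 + 1))
      PySem.Dict.empty
  let recs :=
    pvRules.foldl
      (fun recs r =>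
        let c := counts.getD (some r.1) 0
        if c ≠ 0 then recs ++ [r.2.1 ++ PySem.Int.toStr c ++ r.2.2] else recs)
      []
  if recs.isEmpty then [pvAllOk] else recs

-- ===== PRECONDITION & SPEC =====
def Spec_generate_cluster_recommendations_py (addon_analyses : List (List (String × String))) (out : List String) : Prop := out = generate_cluster_recommendations_py_alt addon_analyses
instance (addon_analyses : List (List (String × String))) (out : List String) : Decidable (Spec_generate_cluster_recommendations_py addon_analyses out) := by unfold Spec_generate_cluster_recommendations_py; infer_instance

-- ===== CLAIM =====
def Claim_equal_generate_cluster_recommendations_py : Prop := ∀ (addon_analyses : List (List (String × String))), Dom_generate_cluster_recommendations_py addon_analyses → Spec_generate_cluster_recommendations_py addon_analyses (generate_cluster_recommendations_py addon_analyses)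

-- ===== LEMMAS AND PROOFS =====

-- the frequency table read back at key (some v) is the length of A's filter at status v
theorem pv_counts_getD (aa : List (List (String × String))) (v : String) :
    ((aa.foldl
        (fun (d : PySem.Dict (Option String) Int) a =>
          let s := List.lookup "validation_status" a
          d.insert s (d.getD s 0 + 1))
        PySem.Dict.empty).getD (some v) 0)
    = ((aa.filter (fun a => List.lookup "validation_status" a == some v)).length : Int) := by
  have h := PySem.Dict.getD_foldl_insert_add_one
      (l := aa.map (fun a => List.lookup "validation_status" a))
      (d := (PySem.Dict.empty : PySem.Dict (Option String) Int)) (v := some v)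
  rw [List.foldl_map] at h
  simp only [h, PySem.Dict.getD_empty, zero_add, List.count_eq_countP, List.countP_map]
  rw [List.countP_eq_length_filter]
  norm_cast

theorem generate_cluster_recommendations_py_eq (aa : List (List (String × String))) :
    generate_cluster_recommendations_py aa = generate_cluster_recommendations_py_alt aa := by
  unfold generate_cluster_recommendations_py generate_cluster_recommendations_py_alt
  simp only [pvRules, List.foldl_cons, List.foldl_nil, pv_counts_getD, pvAllOk]
  generalize (aa.filter (fun a => List.lookup "validation_status" a == some "error")) = eL
  generalize (aa.filter (fun a => List.lookup "validation_status" a == some "warning")) = wL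
  have hnz : ∀ n : Nat, ((n : Int) + 1 ≠ 0) := by intro n; omega
  rcases eL with _ | ⟨e0, eT⟩ <;> rcases wL with _ | ⟨w0, wT⟩ <;>
    simp [List.isEmpty_cons, hnz]

-- ===== VERDICT =====
theorem generate_cluster_recommendations_py_spec : Claim_equal_generate_cluster_recommendations_py := by
  intro aa _
  exact generate_cluster_recommendations_py_eq aa
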